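-- pv_equiv track=rewrite | github.com/versa-networks/devops | python/Fortinet-to-Versa-Conversion/scripts/step-5.py | replace_app_ids_in_line
-- ===== SOURCE A (Python) =====
-- from typing import Dict, List, Tuple
--
-- def replace_app_ids_in_line(line: str, id_to_versa: Dict[str, str]) -> str:
--     marker = 'application-list "'
--     idx = line.find(marker)
--     if idx == -1:
--         return line
--     val_start = idx + len(marker)
--     val_end = line.find('"', val_start)
--     if val_end == -1:
--         return line
--     ids = line[val_start:val_end].split()
--     mapped = [id_to_versa.get(i, i) for i in ids]
--     return line[:val_start] + " ".join(mapped) + line[val_end:]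
-- ===== SOURCE B (Python) =====
-- def replace_app_ids_in_line(line, id_to_versa):
--     # Single left-to-right pass with an explicit state machine and accumulators,
--     # instead of staged find/slice/split/join passes.
--     M = 'application-list "'
--     out = []          # pieces emitted so far
--     tok = []          # characters of the token currently being read inside the value
--     started = False   # has a token already been emitted into the value?
--     state = 0         # 0: before the marker, 1: inside the quoted value, 2: after it
--     i = 0
--     n = len(line)
--     while i < n:
--         c = line[i]
--         if state == 0:
--             if line.startswith(M, i):
--                 out.append(M)
--                 i += len(M)
--                 state = 1
--                 continue
--             out.append(c)
--         elif state == 1: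
--             if c == '"':
--                 if tok:
--                     if started:
--                         out.append(' ')
--                     t = ''.join(tok)
--                     out.append(id_to_versa.get(t, t))
--                 out.append(c)
--                 state = 2
--             elif c.isspace():
--                 if tok:
--                     if started:
--                         out.append(' ')
--                     t = ''.join(tok)
--                     out.append(id_to_versa.get(t, t))
--                     started = True
--                     tok = []
--             else:
--                 tok.append(c)
--         else:
--             out.append(c)
--         i += 1
--     if state == 1:
--         return line    # opened value never closed: leave the line untouched
--     return ''.join(out)
-- ===== Notes on version B (the rewrite author's own statement) =====
-- stated objective: alternative
-- what changed: Replaces A's staged passes (find marker, find closing quote, slice, split, map, join, concatenate slices) by a single left-to-right character scan with an explicit 3-state machine and a token accumulator that emits the mapped tokens incrementally.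
import Mathlib
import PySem

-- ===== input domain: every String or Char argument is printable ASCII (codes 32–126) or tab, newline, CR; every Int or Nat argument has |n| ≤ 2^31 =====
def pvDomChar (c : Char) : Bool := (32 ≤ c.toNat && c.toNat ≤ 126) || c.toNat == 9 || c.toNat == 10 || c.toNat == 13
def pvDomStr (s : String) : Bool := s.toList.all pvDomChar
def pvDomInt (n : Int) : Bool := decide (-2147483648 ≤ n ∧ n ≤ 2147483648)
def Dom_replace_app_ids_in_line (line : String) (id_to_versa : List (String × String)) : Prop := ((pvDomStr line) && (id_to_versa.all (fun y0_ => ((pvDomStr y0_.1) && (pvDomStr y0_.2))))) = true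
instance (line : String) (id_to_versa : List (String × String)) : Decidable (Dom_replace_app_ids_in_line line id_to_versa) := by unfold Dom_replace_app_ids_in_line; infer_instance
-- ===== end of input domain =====

-- B replaces A's staged find/slice/split/map/join passes by a single left-to-right
-- character scan with a 3-state machine and a token accumulator (alternative; same cost).

-- shared helper: Python's id_to_versa.get(t, t) (dict lookup with default), on List Char tokens
def pvGetD (id_to_versa : List (String × String)) (t : List Char) : List Char :=
  (PySem.Dict.getD (PySem.Dict.mk id_to_versa) (String.ofList t) (String.ofList t)).toList

-- ===== PORT A =====
def replace_app_ids_in_line (line : String) (id_to_versa : List (String × String)) : String :=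
  let marker : List Char := "application-list \"".toList
  let cs := line.toList
  let idx := PySem.Chars.find cs marker
  if idx = -1 then line
  else
    let val_start := idx + (marker.length : Int)
    let val_end := PySem.Chars.findFrom cs ['"'] val_start
    if val_end = -1 then line
    else
      let ids := PySem.Chars.split₀ (PySem.Chars.slice cs (some val_start) (some val_end))
      let mapped := ids.map (pvGetD id_to_versa)
      String.ofList (PySem.Chars.slice cs none (some val_start) ++ PySem.Chars.join [' '] mapped ++ PySem.Chars.slice cs (some val_end) none)

-- ===== PORT B =====
-- Source B's single-pass state-machine loop, one recursive function per state.

-- Source B state 2: after the closing quote — copy the remaining characters one by one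
def pvB2 (cs res : List Char) : String :=
  match cs with
  | [] => String.ofList res
  | c :: rest => pvB2 rest (res ++ [c])

-- Source B's `if tok: (if started: out.append(' ')); out.append(d.get(t, t))` flush step
def pvFlush (d : List (String × String)) (started : Bool) (tok : List Char) : List Char :=
  if tok = [] then [] else (if started then [' '] else []) ++ pvGetD d tok

-- Source B state 1: inside the quoted value, reading tokens into `tok`
def pvB1 (line : String) (d : List (String × String)) (cs res tok : List Char) (started : Bool) : String :=
  match cs with
  | [] => line                              -- state stayed 1: value never closed
  | c :: rest =>
    if c = '"' then pvB2 rest (res ++ pvFlush d started tok ++ [c])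
    else if PySem.Chars.isspace c then
      if tok = [] then pvB1 line d rest res [] started
      else pvB1 line d rest (res ++ pvFlush d started tok) [] true
    else pvB1 line d rest res (tok ++ [c]) started

-- Source B state 0: before the marker M (Source B's local constant, passed as a parameter)
def pvB0 (line : String) (d : List (String × String)) (M : List Char) (cs res : List Char) : String :=
  match cs with
  | [] => String.ofList res
  | c :: rest =>
    if PySem.Chars.startswith (c :: rest) M then
      pvB1 line d ((c :: rest).drop M.length) (res ++ M) [] false
    else pvB0 line d M rest (res ++ [c])

def replace_app_ids_in_line_alt (line : String) (id_to_versa : List (String × String)) : String :=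
  pvB0 line id_to_versa "application-list \"".toList line.toList []

-- ===== PRECONDITION & SPEC =====
def Spec_replace_app_ids_in_line (line : String) (id_to_versa : List (String × String)) (out : String) : Prop := out = replace_app_ids_in_line_alt line id_to_versa
instance (line : String) (id_to_versa : List (String × String)) (out : String) : Decidable (Spec_replace_app_ids_in_line line id_to_versa out) := by unfold Spec_replace_app_ids_in_line; infer_instance

-- ===== CLAIM (what is proved, stated in full; the proofs are below) =====
def Claim_equal_replace_app_ids_in_line : Prop := ∀ (line : String) (id_to_versa : List (String × String)), Dom_replace_app_ids_in_line line id_to_versa → Spec_replace_app_ids_in_line line id_to_versa (replace_app_ids_in_line line id_to_versa)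

-- ===== LEMMAS AND PROOFS =====

-- what pvB1 emits for the value characters alone
def pvE (d : List (String × String)) (started : Bool) (tok v : List Char) : List Char :=
  match v with
  | [] => pvFlush d started tok
  | c :: v =>
    if PySem.Chars.isspace c then
      if tok = [] then pvE d started [] v
      else pvFlush d started tok ++ pvE d true [] v
    else pvE d started (tok ++ [c]) v

-- the mapped tokens joined by single spaces, with a leading space iff `started`
def pvG (d : List (String × String)) (started : Bool) (toks : List (List Char)) : List Char :=
  match toks with
  | [] => []
  | t :: toks => (if started then [' '] else []) ++ pvGetD d t ++ pvG d true toks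

-- one-step (definitional) unfolding equations
theorem pvB1_cons (line : String) (d : List (String × String)) (c : Char)
    (rest res tok : List Char) (started : Bool) :
    pvB1 line d (c :: rest) res tok started =
      if c = '"' then pvB2 rest (res ++ pvFlush d started tok ++ [c])
      else if PySem.Chars.isspace c then
        if tok = [] then pvB1 line d rest res [] started
        else pvB1 line d rest (res ++ pvFlush d started tok) [] true
      else pvB1 line d rest res (tok ++ [c]) started := rfl

theorem pvB0_cons (line : String) (d : List (String × String)) (M : List Char) (c : Char)
    (rest res : List Char) :
    pvB0 line d M (c :: rest) res =
      if PySem.Chars.startswith (c :: rest) M then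
        pvB1 line d ((c :: rest).drop M.length) (res ++ M) [] false
      else pvB0 line d M rest (res ++ [c]) := rfl

theorem pvE_cons (d : List (String × String)) (started : Bool) (tok : List Char) (c : Char)
    (v : List Char) :
    pvE d started tok (c :: v) =
      if PySem.Chars.isspace c then
        if tok = [] then pvE d started [] v
        else pvFlush d started tok ++ pvE d true [] v
      else pvE d started (tok ++ [c]) v := rfl

theorem pvB2_eq (cs : List Char) : ∀ res, pvB2 cs res = String.ofList (res ++ cs) := by
  induction cs with
  | nil => intro res; simp [pvB2]
  | cons c rest ih => intro res; simp [pvB2, ih]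

theorem pv_ofList_toList (s : String) : String.ofList s.toList = s := by simp [String.ofList]

-- find.go at offset k is find plus k (when found)
theorem pv_find_go (sub : List Char) (hsub : sub ≠ []) (cs : List Char) :
    ∀ k : ℕ, PySem.Chars.find.go sub cs k =
      if PySem.Chars.find cs sub = -1 then -1 else PySem.Chars.find cs sub + k := by
  induction cs with
  | nil =>
    intro k
    simp [PySem.Chars.find, PySem.Chars.find.go, List.isEmpty_iff, hsub]
  | cons c rest ih =>
    intro k
    by_cases hp : sub.isPrefixOf (c :: rest) = true
    · simp [PySem.Chars.find, PySem.Chars.find.go, hp]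
    · have hle := PySem.Chars.neg_one_le_find (s := rest) (sub := sub)
      have e : ∀ k' : ℕ, PySem.Chars.find.go sub (c :: rest) k' = PySem.Chars.find.go sub rest (k' + 1) := by
        intro k'; simp [PySem.Chars.find.go, hp]
      simp only [PySem.Chars.find]
      rw [e k, e 0, ih (k + 1), ih 1]
      by_cases h : PySem.Chars.find rest sub = -1
      · simp [h]
      · have h2 : ¬(PySem.Chars.find rest sub + ((1:ℕ):ℤ) = -1) := by push_cast; omega
        simp only [if_neg h, if_neg h2]
        push_cast; ring

-- cons recurrence for find
theorem pv_find_cons (sub : List Char) (hsub : sub ≠ []) (c : Char) (rest : List Char) :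
    PySem.Chars.find (c :: rest) sub =
      if sub.isPrefixOf (c :: rest) = true then 0
      else if PySem.Chars.find rest sub = -1 then -1 else PySem.Chars.find rest sub + 1 := by
  by_cases hp : sub.isPrefixOf (c :: rest) = true
  · simp [PySem.Chars.find, PySem.Chars.find.go, hp]
  · simp only [PySem.Chars.find, PySem.Chars.find.go, hp, if_false]
    have := pv_find_go sub hsub rest 1
    simp only [PySem.Chars.find] at this ⊢
    rw [this]
    split_ifs <;> simp

theorem pv_find_nil (sub : List Char) (hsub : sub ≠ []) : PySem.Chars.find [] sub = -1 := by
  simp [PySem.Chars.find, PySem.Chars.find.go, List.isEmpty_iff, hsub]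

-- the value-state machine, characterised by the position of the closing quote
theorem pvB1_eq (line : String) (d : List (String × String)) (cs : List Char) :
    ∀ res tok started,
      pvB1 line d cs res tok started =
        if PySem.Chars.find cs ['"'] = -1 then line
        else String.ofList (res ++ pvE d started tok (cs.take (PySem.Chars.find cs ['"']).toNat)
              ++ cs.drop (PySem.Chars.find cs ['"']).toNat) := by
  induction cs with
  | nil =>
    intro res tok started
    rw [pv_find_nil ['"'] (by decide)]
    simp [pvB1]
  | cons c rest ih =>
    intro res tok started
    rw [pv_find_cons ['"'] (by decide) c rest, pvB1_cons]
    by_cases hq : c = '"'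
    · subst hq
      have hp : (['"'] : List Char).isPrefixOf ('"' :: rest) = true := by
        simp [List.isPrefixOf]
      rw [if_pos hp, if_pos rfl, if_neg (show ¬((0:ℤ) = -1) by decide)]
      simp only [Int.toNat_zero, List.take_zero, List.drop_zero]
      rw [pvB2_eq]
      simp [pvE, List.append_assoc]
    · have hpne : ¬((['"'] : List Char).isPrefixOf (c :: rest) = true) := by
        simp [List.isPrefixOf, Ne.symm hq]
      rw [if_neg hq, if_neg hpne]
      by_cases hfr : PySem.Chars.find rest ['"'] = -1
      · rw [if_pos hfr, if_pos rfl]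
        by_cases hsp : PySem.Chars.isspace c = true
        · rw [if_pos hsp]
          by_cases htok : tok = ([] : List Char)
          · rw [if_pos htok, ih res [] started, if_pos hfr]
          · rw [if_neg htok, ih (res ++ pvFlush d started tok) [] true, if_pos hfr]
        · rw [if_neg hsp, ih res (tok ++ [c]) started, if_pos hfr]
      · have hle := PySem.Chars.neg_one_le_find (s := rest) (sub := ['"'])
        have hge : 0 ≤ PySem.Chars.find rest ['"'] := by omega
        obtain ⟨n, hn⟩ : ∃ n : ℕ, PySem.Chars.find rest ['"'] = (n : ℤ) :=
          ⟨(PySem.Chars.find rest ['"']).toNat, (Int.toNat_of_nonneg hge).symm⟩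
        have h3 : ¬((n : ℤ) = -1) := by omega
        have h1 : ¬((n : ℤ) + 1 = -1) := by omega
        rw [if_neg hfr, hn, if_neg h1,
          (show ((n : ℤ) + 1).toNat = n + 1 by omega), List.take_succ_cons, List.drop_succ_cons,
          pvE_cons]
        by_cases hsp : PySem.Chars.isspace c = true
        · rw [if_pos hsp, if_pos hsp]
          by_cases htok : tok = ([] : List Char)
          · rw [if_pos htok, if_pos htok, ih res [] started, hn, if_neg h3, Int.toNat_natCast]
          · rw [if_neg htok, if_neg htok,
              ih (res ++ pvFlush d started tok) [] true, hn, if_neg h3, Int.toNat_natCast]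
            simp [List.append_assoc]
        · rw [if_neg hsp, if_neg hsp, ih res (tok ++ [c]) started, hn, if_neg h3,
            Int.toNat_natCast]

-- split₀.go with a non-empty accumulator prepends it (reversed)
theorem pv_go_acc (v : List Char) :
    ∀ cur acc, PySem.Chars.split₀.go v cur acc = acc.reverse ++ PySem.Chars.split₀.go v cur [] := by
  induction v with
  | nil =>
    intro cur acc
    simp only [PySem.Chars.split₀.go]
    split_ifs <;> simp
  | cons c v ih =>
    intro cur acc
    simp only [PySem.Chars.split₀.go]
    split_ifs with h1 h2
    · rw [ih [] acc]
    · rw [ih [] (cur.reverse :: acc), ih [] [cur.reverse]]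
      simp
    · rw [ih (c :: cur) acc]

-- the emitter pvE computes pvG over split₀'s tokens
theorem pvE_eq_pvG (d : List (String × String)) (v : List Char) :
    ∀ tok started, pvE d started tok v = pvG d started (PySem.Chars.split₀.go v tok.reverse []) := by
  induction v with
  | nil =>
    intro tok started
    simp only [pvE, PySem.Chars.split₀.go, List.isEmpty_iff, List.reverse_eq_nil_iff]
    by_cases htok : tok = ([] : List Char)
    · simp [htok, pvFlush, pvG]
    · simp [htok, pvFlush, pvG]
  | cons c v ih =>
    intro tok started
    simp only [pvE, PySem.Chars.split₀.go, List.isEmpty_iff, List.reverse_eq_nil_iff]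
    by_cases hsp : PySem.Chars.isspace c = true
    · by_cases htok : tok = ([] : List Char)
      · simp only [hsp, if_true, htok, if_pos rfl]
        exact ih [] started
      · simp only [hsp, if_true, if_neg htok]
        rw [ih [] true, pv_go_acc v [] [tok.reverse.reverse]]
        simp only [List.reverse_reverse, List.reverse_cons, List.reverse_nil, List.nil_append,
          List.singleton_append]
        simp [pvG, pvFlush, htok, List.append_assoc]
    · simp only [hsp, Bool.false_eq_true, if_false]
      have hrev : (tok ++ [c]).reverse = c :: tok.reverse := by simp
      rw [ih (tok ++ [c]) started, hrev]

-- " ".join of mapped tokens, one token split off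
theorem pv_join_eq (d : List (String × String)) (toks : List (List Char)) :
    ∀ x, PySem.Chars.join [' '] (x :: toks.map (pvGetD d)) = x ++ pvG d true toks := by
  induction toks with
  | nil => intro x; simp [PySem.Chars.join_singleton, pvG]
  | cons t toks ih =>
    intro x
    simp only [List.map_cons, PySem.Chars.join_cons_cons]
    rw [ih (pvGetD d t)]
    simp [pvG, List.append_assoc]

-- pvG with started = false is exactly " ".join of the mapped tokens
theorem pvG_false (d : List (String × String)) (toks : List (List Char)) :
    pvG d false toks = PySem.Chars.join [' '] (toks.map (pvGetD d)) := by
  cases toks with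
  | nil => simp [pvG, PySem.Chars.join_nil]
  | cons t toks =>
    simp only [List.map_cons]
    rw [pv_join_eq d toks (pvGetD d t)]
    simp [pvG]

-- the marker-scanning state, characterised by the position of the marker
theorem pvB0_eq (line : String) (d : List (String × String)) (M : List Char) (hM : M ≠ [])
    (cs : List Char) :
    ∀ res, pvB0 line d M cs res =
      if PySem.Chars.find cs M = -1 then String.ofList (res ++ cs)
      else pvB1 line d (cs.drop ((PySem.Chars.find cs M).toNat + M.length))
            (res ++ cs.take (PySem.Chars.find cs M).toNat ++ M) [] false := by
  induction cs with
  | nil =>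
    intro res
    rw [pv_find_nil M hM]
    simp [pvB0]
  | cons c rest ih =>
    intro res
    rw [pv_find_cons M hM c rest, pvB0_cons]
    by_cases hp : M.isPrefixOf (c :: rest) = true
    · rw [if_pos (show PySem.Chars.startswith (c :: rest) M = true from hp), if_pos hp,
        if_neg (show ¬((0:ℤ) = -1) by decide)]
      simp only [Int.toNat_zero, List.take_zero, Nat.zero_add, List.append_nil]
    · rw [if_neg (show ¬(PySem.Chars.startswith (c :: rest) M = true) from hp), if_neg hp]
      by_cases hfr : PySem.Chars.find rest M = -1
      · rw [if_pos hfr, if_pos rfl, ih (res ++ [c]), if_pos hfr]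
        simp
      · have hle := PySem.Chars.neg_one_le_find (s := rest) (sub := M)
        have hge : 0 ≤ PySem.Chars.find rest M := by omega
        obtain ⟨n, hn⟩ : ∃ n : ℕ, PySem.Chars.find rest M = (n : ℤ) :=
          ⟨(PySem.Chars.find rest M).toNat, (Int.toNat_of_nonneg hge).symm⟩
        have h3 : ¬((n : ℤ) = -1) := by omega
        have h1 : ¬((n : ℤ) + 1 = -1) := by omega
        rw [if_neg hfr, hn, if_neg h1,
          (show ((n : ℤ) + 1).toNat = n + 1 by omega), List.take_succ_cons,
          (show n + 1 + M.length = (n + M.length) + 1 by omega), List.drop_succ_cons,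
          ih (res ++ [c]), hn, if_neg h3, Int.toNat_natCast]
        simp [List.append_assoc]

-- a prefix of a drop splits the list into take / prefix / rest
theorem pv_take_add_of_prefix_drop {cs p : List Char} {n : ℕ}
    (h : p <+: cs.drop n) : cs.take (n + p.length) = cs.take n ++ p := by
  rw [List.take_add]
  congr 1
  exact (List.prefix_iff_eq_take.mp h).symm

theorem pv_main (line : String) (id_to_versa : List (String × String)) :
    replace_app_ids_in_line line id_to_versa = replace_app_ids_in_line_alt line id_to_versa := by
  simp only [replace_app_ids_in_line, replace_app_ids_in_line_alt]
  set cs := line.toList with hcs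
  set m := "application-list \"".toList with hm
  have hmne : m ≠ [] := by rw [hm]; decide
  have hmlen : m.length = 18 := by rw [hm]; rfl
  rw [pvB0_eq line id_to_versa m hmne cs []]
  by_cases h1 : PySem.Chars.find cs m = -1
  · rw [if_pos h1, if_pos h1, List.nil_append, hcs, pv_ofList_toList]
  · have hge : 0 ≤ PySem.Chars.find cs m := by
      have := PySem.Chars.neg_one_le_find (s := cs) (sub := m)
      omega
    obtain ⟨i, hi⟩ : ∃ n : ℕ, PySem.Chars.find cs m = (n : ℤ) :=
      ⟨(PySem.Chars.find cs m).toNat, (Int.toNat_of_nonneg hge).symm⟩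
    have hpre : m <+: cs.drop i := by
      have h := (PySem.Chars.find_spec (s := cs) (sub := m) hge).1
      rwa [hi, Int.toNat_natCast] at h
    have hilen : i + 18 ≤ cs.length := by
      have h18 : 18 ≤ (cs.drop i).length := by
        have := hpre.length_le
        rw [hmlen] at this
        omega
      simp [List.length_drop] at h18
      omega
    have hne : ¬ ((i : ℤ) = -1) := by omega
    rw [hi]
    rw [if_neg hne, if_neg hne, hmlen, Int.toNat_natCast]
    have hcast : (i : ℤ) + ((18 : ℕ) : ℤ) = ((i + 18 : ℕ) : ℤ) := by push_cast; ring
    rw [hcast, PySem.Chars.findFrom_natCast cs ['"'] (i + 18) hilen]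
    rw [pvB1_eq]
    by_cases h2 : PySem.Chars.find (cs.drop (i + 18)) ['"'] = -1
    · simp [h2]
    · have hge2 : 0 ≤ PySem.Chars.find (cs.drop (i + 18)) ['"'] := by
        have := PySem.Chars.neg_one_le_find (s := cs.drop (i + 18)) (sub := ['"'])
        omega
      obtain ⟨j, hj⟩ : ∃ n : ℕ, PySem.Chars.find (cs.drop (i + 18)) ['"'] = (n : ℤ) :=
        ⟨(PySem.Chars.find (cs.drop (i + 18)) ['"']).toNat, (Int.toNat_of_nonneg hge2).symm⟩
      have hjne : ¬ ((j : ℤ) = -1) := by omega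
      have hne2 : ¬ (((i + 18 : ℕ) : ℤ) + (j : ℤ) = -1) := by
        have : (0:ℤ) ≤ ((i + 18 : ℕ) : ℤ) := by positivity
        omega
      rw [hj, if_neg hjne, if_neg hne2, if_neg hjne, Int.toNat_natCast]
      rw [show ((i + 18 : ℕ) : ℤ) + (j : ℤ) = ((i + 18 + j : ℕ) : ℤ) by push_cast; ring]
      simp only [PySem.Chars.slice_eq_listSlice, PySem.List.slice_to_natCast,
        PySem.List.slice_natCast, PySem.List.slice_from_natCast]
      have h3 : cs.take (i + 18) = cs.take i ++ m := by
        have h := pv_take_add_of_prefix_drop hpre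
        rwa [hmlen] at h
      have h5 : (i + 18 + j) - (i + 18) = j := by omega
      have hmid : pvE id_to_versa false [] ((cs.drop (i + 18)).take j)
          = PySem.Chars.join [' ']
              ((PySem.Chars.split₀ ((cs.drop (i + 18)).take j)).map (pvGetD id_to_versa)) := by
        rw [pvE_eq_pvG id_to_versa ((cs.drop (i + 18)).take j) [] false]
        simp only [List.reverse_nil]
        rw [← pvG_false]
        rfl
      have h6 : (cs.drop (i + 18)).drop j = cs.drop (i + 18 + j) := by
        rw [List.drop_drop]
      rw [h5, h3, hmid, h6]
      simp [List.append_assoc]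

-- ===== VERDICT (by name: the statement is the Claim_ definition above) =====
theorem replace_app_ids_in_line_spec : Claim_equal_replace_app_ids_in_line := by
  intro line d _
  unfold Spec_replace_app_ids_in_line
  exact pv_main line d
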